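-- pv_equiv track=rewrite | github.com/yaoliliu/FreeFuse | src/pipeline/freefuse_ltx2_pipeline.py | _remap_positions_to_connector_indices
-- ===== SOURCE A (Python) =====
-- from typing import Any, Callable, Dict, List, Optional, Tuple, Union
--
-- def _remap_positions_to_connector_indices(
--     positions: List[int],
--     first_valid_idx: int,
--     valid_token_count: int,
-- ) -> List[int]:
--     if valid_token_count <= 0:
--         return []
--
--     remapped: List[int] = []
--     for pos in positions:
--         new_pos = int(pos) - int(first_valid_idx)
--         if 0 <= new_pos < valid_token_count:
--             remapped.append(new_pos)
--     return sorted(set(remapped))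
-- ===== SOURCE B (Python) =====
-- def _remap_positions_to_connector_indices(positions, first_valid_idx, valid_token_count):
--     if valid_token_count <= 0:
--         return []
--     out = []
--     prev = None
--     for pos in sorted(positions):
--         new_pos = int(pos) - int(first_valid_idx)
--         if 0 <= new_pos < valid_token_count and new_pos != prev:
--             out.append(new_pos)
--             prev = new_pos
--     return out
-- ===== Notes on version B (the rewrite author's own statement) =====
-- stated objective: alternative
-- what changed: Instead of collecting in-range remapped positions and then calling sorted(set(...)), B sorts the raw positions once and does a single scan that remaps, range-filters and deduplicates adjacent equal values, emitting the result already sorted and unique (no set, no second sort).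
import Mathlib
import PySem

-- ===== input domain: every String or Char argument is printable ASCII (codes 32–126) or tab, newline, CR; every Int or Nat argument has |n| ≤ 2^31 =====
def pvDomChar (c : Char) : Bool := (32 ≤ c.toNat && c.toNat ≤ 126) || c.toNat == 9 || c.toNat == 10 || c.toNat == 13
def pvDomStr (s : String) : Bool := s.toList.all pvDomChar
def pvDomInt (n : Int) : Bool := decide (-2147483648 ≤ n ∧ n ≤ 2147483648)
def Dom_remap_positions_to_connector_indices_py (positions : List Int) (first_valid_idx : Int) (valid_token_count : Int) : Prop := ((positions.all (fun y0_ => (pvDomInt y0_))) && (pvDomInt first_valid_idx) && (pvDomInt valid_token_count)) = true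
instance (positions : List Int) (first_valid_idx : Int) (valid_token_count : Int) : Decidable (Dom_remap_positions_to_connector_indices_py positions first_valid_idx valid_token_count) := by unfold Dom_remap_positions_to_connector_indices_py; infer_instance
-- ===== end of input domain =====

-- B replaces A's collect-then-sorted(set(...)) by sorting the raw positions once and a single scan
-- that remaps, range-filters and skips adjacent duplicates (no set, no second sort); equal returns proved.

-- ===== PORT A =====
def remap_positions_to_connector_indices_py (positions : List Int) (first_valid_idx : Int) (valid_token_count : Int) : List Int :=
  if valid_token_count ≤ 0 then []
  else
    let remapped := positions.foldl (fun acc pos =>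
      let new_pos := pos - first_valid_idx
      if (decide (0 ≤ new_pos) && decide (new_pos < valid_token_count)) = true then acc ++ [new_pos] else acc) []
    PySem.List.sorted (PySem.Set.ofList remapped) (fun x => x)

-- ===== PORT B =====
-- B-side helper: the loop body of Source B's scan over sorted(positions)
-- (Python's 'new_pos != prev' with prev: Optional[int] is 'st.2 ≠ some new_pos': always true while prev is None)
def pvScanStep (fvi n : Int) (st : List Int × Option Int) (pos : Int) : List Int × Option Int :=
  if (decide (0 ≤ pos - fvi) && decide (pos - fvi < n) && decide (st.2 ≠ some (pos - fvi))) = true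
  then (st.1 ++ [pos - fvi], some (pos - fvi)) else st

def remap_positions_to_connector_indices_py_alt (positions : List Int) (first_valid_idx : Int) (valid_token_count : Int) : List Int :=
  if valid_token_count ≤ 0 then []
  else
    ((PySem.List.sorted positions (fun x => x)).foldl
      (pvScanStep first_valid_idx valid_token_count) ([], none)).1

-- ===== PRECONDITION & SPEC =====
def Spec_remap_positions_to_connector_indices_py (positions : List Int) (first_valid_idx : Int) (valid_token_count : Int) (out : List Int) : Prop := out = remap_positions_to_connector_indices_py_alt positions first_valid_idx valid_token_count
instance (positions : List Int) (first_valid_idx : Int) (valid_token_count : Int) (out : List Int) : Decidable (Spec_remap_positions_to_connector_indices_py positions first_valid_idx valid_token_count out) := by unfold Spec_remap_positions_to_connector_indices_py; infer_instance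

-- ===== CLAIM (what is proved, stated in full; the proofs are below) =====
def Claim_equal_remap_positions_to_connector_indices_py : Prop := ∀ (positions : List Int) (first_valid_idx : Int) (valid_token_count : Int), Dom_remap_positions_to_connector_indices_py positions first_valid_idx valid_token_count → Spec_remap_positions_to_connector_indices_py positions first_valid_idx valid_token_count (remap_positions_to_connector_indices_py positions first_valid_idx valid_token_count)

-- ===== LEMMAS AND PROOFS =====

-- invariant of B's scan over a ≤-sorted list: the output stays strictly increasing and collects
-- exactly the in-range remapped values (adjacent-dedup works because the input is sorted)
lemma scan_spec (fvi n : Int) (xs : List Int) (out : List Int) (prev : Option Int)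
    (hxs : xs.Pairwise (· ≤ ·))
    (H1 : out.Pairwise (· < ·))
    (H2 : ∀ p, prev = some p → ∀ y ∈ out, y ≤ p)
    (H3 : prev = none → out = [])
    (H4 : ∀ p, prev = some p → ∀ x ∈ xs, p ≤ x - fvi)
    (H6 : ∀ p, prev = some p → p ∈ out) :
    (xs.foldl (pvScanStep fvi n) (out, prev)).1.Pairwise (· < ·) ∧
    ∀ y, (y ∈ (xs.foldl (pvScanStep fvi n) (out, prev)).1 ↔
      y ∈ out ∨ ∃ x ∈ xs, 0 ≤ x - fvi ∧ x - fvi < n ∧ x - fvi = y) := by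
  induction xs generalizing out prev with
  | nil =>
    refine ⟨H1, fun y => ?_⟩
    simp
  | cons x xs ih =>
    rcases List.pairwise_cons.1 hxs with ⟨hx, hxs'⟩
    rw [List.foldl_cons]
    by_cases hC : 0 ≤ x - fvi ∧ x - fvi < n ∧ prev ≠ some (x - fvi)
    · have hcond : pvScanStep fvi n (out, prev) x = (out ++ [x - fvi], some (x - fvi)) := by
        unfold pvScanStep
        rw [if_pos (by rw [decide_eq_true hC.1, decide_eq_true hC.2.1, decide_eq_true hC.2.2]; rfl)]
      rw [hcond]
      have hle : ∀ y ∈ out, y ≤ x - fvi := by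
        intro y hy
        cases hprev : prev with
        | none => rw [H3 hprev] at hy; simp at hy
        | some p => exact le_trans (H2 p hprev y hy) (H4 p hprev x (List.mem_cons_self))
      have hlt : ∀ y ∈ out, y < x - fvi := by
        intro y hy
        cases hprev : prev with
        | none => rw [H3 hprev] at hy; simp at hy
        | some p =>
          have h1 := H2 p hprev y hy
          have h2 := H4 p hprev x (List.mem_cons_self)
          have h3 : p ≠ x - fvi := fun h => hC.2.2 (by rw [hprev, h])
          omega
      have hres := ih (out ++ [x - fvi]) (some (x - fvi)) hxs'
        (List.pairwise_append.2 ⟨H1, List.pairwise_singleton _ _, by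
          intro y hy z hz; rw [List.mem_singleton] at hz; subst hz; exact hlt y hy⟩)
        (by intro p hp y hy
            rcases Option.some_inj.1 hp with rfl
            rcases List.mem_append.1 hy with h | h
            · exact hle y h
            · rw [List.mem_singleton] at h; omega)
        (by intro h; cases h)
        (by intro p hp x' hx'
            rcases Option.some_inj.1 hp with rfl
            have := hx x' hx'; omega)
        (by intro p hp
            rcases Option.some_inj.1 hp with rfl
            exact List.mem_append_right _ (List.mem_singleton.2 rfl))
      refine ⟨hres.1, fun y => ?_⟩
      rw [hres.2 y]
      constructor
      · rintro (hy | ⟨x', hx', h⟩)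
        · rcases List.mem_append.1 hy with h | h
          · exact Or.inl h
          · rw [List.mem_singleton] at h; subst h
            exact Or.inr ⟨x, List.mem_cons_self, hC.1, hC.2.1, rfl⟩
        · exact Or.inr ⟨x', List.mem_cons_of_mem _ hx', h⟩
      · rintro (hy | ⟨x', hx', h0, h1, h2⟩)
        · exact Or.inl (List.mem_append_left _ hy)
        · rcases List.mem_cons.1 hx' with rfl | hx''
          · exact Or.inl (List.mem_append_right _ (List.mem_singleton.2 h2.symm))
          · exact Or.inr ⟨x', hx'', h0, h1, h2⟩
    · have hcond : pvScanStep fvi n (out, prev) x = (out, prev) := by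
        unfold pvScanStep
        rw [if_neg]
        intro h
        simp only [Bool.and_eq_true, decide_eq_true_eq] at h
        exact hC ⟨h.1.1, h.1.2, h.2⟩
      rw [hcond]
      have hres := ih out prev hxs' H1 H2 H3
        (by rintro p hp x' hx'; exact H4 p hp x' (List.mem_cons_of_mem _ hx'))
        H6
      refine ⟨hres.1, fun y => ?_⟩
      rw [hres.2 y]
      constructor
      · rintro (hy | ⟨x', hx', h⟩)
        · exact Or.inl hy
        · exact Or.inr ⟨x', List.mem_cons_of_mem _ hx', h⟩
      · rintro (hy | ⟨x', hx', h0, h1, h2⟩)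
        · exact Or.inl hy
        · rcases List.mem_cons.1 hx' with rfl | hx''
          · -- the head was skipped: it is in range, so prev = some (x - fvi), already in out
            have hp : prev = some (x' - fvi) := by
              by_contra hne
              exact hC ⟨h0, h1, hne⟩
            subst h2
            exact Or.inl (H6 _ hp)
          · exact Or.inr ⟨x', hx'', h0, h1, h2⟩

theorem remap_positions_to_connector_indices_py_spec_aux
    (positions : List Int) (first_valid_idx : Int) (valid_token_count : Int) :
    remap_positions_to_connector_indices_py positions first_valid_idx valid_token_count
      = remap_positions_to_connector_indices_py_alt positions first_valid_idx valid_token_count := by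
  unfold remap_positions_to_connector_indices_py remap_positions_to_connector_indices_py_alt
  by_cases hn : valid_token_count ≤ 0
  · simp [hn]
  · rw [if_neg hn, if_neg hn]
    set n := valid_token_count with hnn
    set fvi := first_valid_idx with hfvi
    -- A's collected list
    rw [PySem.List.foldl_append_if (fun pos => decide (0 ≤ pos - fvi) && decide (pos - fvi < n))
      (fun pos => pos - fvi) positions []]
    have hsorted : (PySem.List.sorted positions (fun x => x)).Pairwise (· ≤ ·) :=
      PySem.List.sorted_pairwise positions (fun x => x)
    have hscan := scan_spec fvi n (PySem.List.sorted positions (fun x => x)) [] none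
      hsorted (List.Pairwise.nil) (by rintro p h; cases h) (fun _ => rfl)
      (by rintro p h; cases h) (by rintro p h; cases h)
    set bOut := ((PySem.List.sorted positions (fun x => x)).foldl (pvScanStep fvi n) ([], none)).1 with hbOut
    have hnodupB : bOut.Nodup := hscan.1.imp (fun h => ne_of_lt h)
    have hmemB : ∀ y : Int, y ∈ bOut ↔
        ∃ x ∈ positions, 0 ≤ x - fvi ∧ x - fvi < n ∧ x - fvi = y := by
      intro y
      rw [hscan.2 y]
      constructor
      · rintro (hy | ⟨x, hx, h⟩)
        · simp at hy
        · exact ⟨x, (PySem.List.mem_sorted positions (fun x => x) false x).1 hx, h⟩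
      · rintro ⟨x, hx, h⟩
        exact Or.inr ⟨x, (PySem.List.mem_sorted positions (fun x => x) false x).2 hx, h⟩
    -- membership in A's deduplicated list
    have hmemA : ∀ y : Int, y ∈ PySem.Set.ofList ([] ++ (positions.filter
          (fun pos => decide (0 ≤ pos - fvi) && decide (pos - fvi < n))).map (fun pos => pos - fvi)) ↔
        ∃ x ∈ positions, 0 ≤ x - fvi ∧ x - fvi < n ∧ x - fvi = y := by
      intro y
      rw [PySem.Set.mem_ofList]
      simp only [List.nil_append, List.mem_map, List.mem_filter, Bool.and_eq_true, decide_eq_true_eq]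
      constructor
      · rintro ⟨pos, ⟨hpos, h0, h1⟩, rfl⟩; exact ⟨pos, hpos, h0, h1, rfl⟩
      · rintro ⟨pos, hpos, h0, h1, h2⟩; exact ⟨pos, ⟨hpos, h0, h1⟩, h2⟩
    apply PySem.List.sorted_eq_of_perm_of_pairwise_lt
    · rw [List.perm_ext_iff_of_nodup hnodupB (PySem.Set.nodup_ofList _)]
      intro a; rw [hmemB a, hmemA a]
    · exact hscan.1

-- ===== VERDICT (by name: the statement is the Claim_ definition above) =====
theorem remap_positions_to_connector_indices_py_spec : Claim_equal_remap_positions_to_connector_indices_py := by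
  intro positions first_valid_idx valid_token_count _
  exact remap_positions_to_connector_indices_py_spec_aux positions first_valid_idx valid_token_count
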